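-- pv_equiv track=rewrite | github.com/kojioku/abmptools | abmptools/udfcreate.py | getljparam
-- ===== SOURCE A (Python) =====
-- def getljparam(ffname,atom_list):
--     data=[]
--     for i in range(len(ffname)):
--         for j in range(len(ffname[i])):
--             for k in range(len(atom_list)):
--                 #print ffname[i][1], atom_list[j][0]
--                 if ffname[i][j][1] == atom_list[k][0]:
--                     data.append(atom_list[k])
-- #    print "data",data
--
--     dellist=[]
-- #    print len(data)
--     for i in range(len(data)-1):
--         for j in range(i+1,len(data)):
--             if data[i][0] == data[j][0]:
--                 dellist.append(i)
--                 break
--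
-- #    print "dellist",dellist
--     for i in range(len(dellist)):
-- #        print dellist[-(i+1)]
--         data.pop(dellist[-(i+1)])
-- #    print data
-- #    print ffname
-- #    print atom_list
--     return data
-- ===== SOURCE B (Python) =====
-- def getljparam(ffname, atom_list):
--     # one comprehension collects the matches; keep-last dedup = keep-first over the
--     # reversed list with a 'seen' set, then reverse back
--     matched = [atom
--                for group in ffname
--                for entry in group
--                for atom in atom_list
--                if entry[1] == atom[0]]
--     seen = set()
--     result = []
--     for atom in reversed(matched):
--         if atom[0] not in seen:
--             seen.add(atom[0])
--             result.append(atom)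
--     result.reverse()
--     return result
-- ===== Notes on version B (the rewrite author's own statement) =====
-- stated objective: simpler
-- what changed: A's O(M^2) pairwise dellist scan followed by index pops is replaced by a single reversed pass with a 'seen' set (keep-last dedup = keep-first on the reverse), and the index-driven triple matching loop becomes one comprehension.
import Mathlib
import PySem

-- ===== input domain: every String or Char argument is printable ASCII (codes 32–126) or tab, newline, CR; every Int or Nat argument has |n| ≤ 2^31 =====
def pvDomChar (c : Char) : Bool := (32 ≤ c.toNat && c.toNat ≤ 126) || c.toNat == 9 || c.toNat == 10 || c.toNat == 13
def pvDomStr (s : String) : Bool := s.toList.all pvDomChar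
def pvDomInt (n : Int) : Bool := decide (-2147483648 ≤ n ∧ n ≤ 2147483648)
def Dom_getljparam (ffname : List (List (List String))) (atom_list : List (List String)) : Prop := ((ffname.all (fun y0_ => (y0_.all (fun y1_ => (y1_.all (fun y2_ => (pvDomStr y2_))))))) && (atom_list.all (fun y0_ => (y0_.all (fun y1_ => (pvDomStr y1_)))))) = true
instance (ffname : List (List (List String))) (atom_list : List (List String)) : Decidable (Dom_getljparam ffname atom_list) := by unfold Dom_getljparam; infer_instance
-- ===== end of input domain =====

-- B replaces A's O(M^2) pairwise dellist/pop dedup phases by a single reversed scan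
-- with a 'seen' set (keep-last = keep-first on the reverse); the match collection
-- becomes one comprehension.  Objective: simpler.

-- ===== PORT A =====
-- data phase: triple index loop, append atom_list[k] when ffname[i][j][1] == atom_list[k][0]
def pyDataA (ffname : List (List (List String))) (atom_list : List (List String)) : List (List String) :=
  (PySem.List.pyRange 0 (PySem.List.len ffname) 1).foldl (fun data i =>
    (PySem.List.pyRange 0 (PySem.List.len (PySem.List.pyGetD ffname i [])) 1).foldl (fun data j =>
      (PySem.List.pyRange 0 (PySem.List.len atom_list) 1).foldl (fun data k =>
        if PySem.List.pyGetD (PySem.List.pyGetD (PySem.List.pyGetD ffname i []) j []) 1 "" ==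
           PySem.List.pyGetD (PySem.List.pyGetD atom_list k []) 0 ""
        then data ++ [PySem.List.pyGetD atom_list k []] else data) data) data) []
-- dellist phase: i appended once iff some later j has data[i][0] == data[j][0] (the break)
def pyDellistA (data : List (List String)) : List Int :=
  (PySem.List.pyRange 0 (PySem.List.len data - 1) 1).foldl (fun dl i =>
    if (PySem.List.pyRange (i+1) (PySem.List.len data) 1).any (fun j =>
         PySem.List.pyGetD (PySem.List.pyGetD data i []) 0 "" ==
         PySem.List.pyGetD (PySem.List.pyGetD data j []) 0 "")
    then dl ++ [i] else dl) []
def getljparam (ffname : List (List (List String))) (atom_list : List (List String)) : List (List String) :=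
  let data := pyDataA ffname atom_list
  let dellist := pyDellistA data
  -- pop dellist indices from data, back to front
  (PySem.List.pyRange 0 (PySem.List.len dellist) 1).foldl (fun d i =>
    ((PySem.List.pop? d (PySem.List.pyGetD dellist (-(i+1)) 0)).map Prod.snd).getD d) data

-- ===== PORT B =====
def getljparam_alt (ffname : List (List (List String))) (atom_list : List (List String)) : List (List String) :=
  let matched : List (List String) :=
    ffname.flatMap (fun group => group.flatMap (fun entry =>
      atom_list.filter (fun atom =>
        PySem.List.pyGetD entry 1 "" == PySem.List.pyGetD atom 0 "")))
  let p : PySem.Set String × List (List String) :=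
    matched.reverse.foldl (fun p atom =>
      if !(PySem.Set.contains p.1 (PySem.List.pyGetD atom 0 ""))
      then (PySem.Set.add p.1 (PySem.List.pyGetD atom 0 ""), p.2 ++ [atom])
      else p) (PySem.Set.empty, [])
  p.2.reverse

-- ===== PRECONDITION & SPEC =====
-- Pre_ excludes exactly the inputs where A raises IndexError: whenever the triple
-- loop body runs at all (atom_list nonempty and some ffname group nonempty), every
-- ffname entry must have length ≥ 2 and every atom_list element must be nonempty.
def Pre_getljparam (ffname : List (List (List String))) (atom_list : List (List String)) : Prop :=
  (atom_list ≠ [] ∧ ∃ g ∈ ffname, g ≠ []) →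
    ((∀ g ∈ ffname, ∀ e ∈ g, 2 ≤ e.length) ∧ ∀ a ∈ atom_list, a ≠ [])
instance (ffname : List (List (List String))) (atom_list : List (List String)) : Decidable (Pre_getljparam ffname atom_list) := by unfold Pre_getljparam; infer_instance
def pvWitness_getljparam : List (List (List String)) × List (List String) :=
  ([[["C", "CA"]]], [["CA", "1.9"]])
def Spec_getljparam (ffname : List (List (List String))) (atom_list : List (List String)) (out : List (List String)) : Prop := out = getljparam_alt ffname atom_list
instance (ffname : List (List (List String))) (atom_list : List (List String)) (out : List (List String)) : Decidable (Spec_getljparam ffname atom_list out) := by unfold Spec_getljparam; infer_instance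

-- ===== CLAIM (what is proved, stated in full; the proofs are below) =====
def Claim_equal_getljparam : Prop := ∀ (ffname : List (List (List String))) (atom_list : List (List String)), Dom_getljparam ffname atom_list → Pre_getljparam ffname atom_list → Spec_getljparam ffname atom_list (getljparam ffname atom_list)

-- ===== LEMMAS AND PROOFS =====

-- the dedup key both programs use: element[0] (total via the port's default)
def akey (a : List String) : String := PySem.List.pyGetD a 0 ""

-- keep-last dedup, the common specification of both dedup phases
def keepLast : List (List String) → List (List String)
  | [] => []
  | x :: xs => if xs.any (fun y => akey x == akey y) then keepLast xs else x :: keepLast xs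

-- the list of matches, shared shape of A's data and B's matched
def matchedOf (ffname : List (List (List String))) (atom_list : List (List String)) : List (List String) :=
  ffname.flatMap (fun group => group.flatMap (fun entry =>
    atom_list.filter (fun atom =>
      PySem.List.pyGetD entry 1 "" == PySem.List.pyGetD atom 0 "")))

-- ---- A-side abstractions ----
def popStep (d : List (List String)) (i : Int) : List (List String) :=
  ((PySem.List.pop? d i).map Prod.snd).getD d
def erasePops (dl : List Int) (l : List (List String)) : List (List String) :=
  dl.foldr (fun i d => popStep d i) l
def apred (l : List (List String)) (i : Int) : Bool :=
  (PySem.List.pyRange (i+1) (PySem.List.len l) 1).any (fun j =>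
    PySem.List.pyGetD (PySem.List.pyGetD l i []) 0 "" ==
    PySem.List.pyGetD (PySem.List.pyGetD l j []) 0 "")
def adel (l : List (List String)) : List Int :=
  (PySem.List.pyRange 0 (PySem.List.len l - 1) 1).filter (apred l)

theorem pyRange_map_succ (a b : Int) :
    (PySem.List.pyRange a b 1).map (·+1) = PySem.List.pyRange (a+1) (b+1) 1 := by
  simp [PySem.List.pyRange_one, List.map_map]
  intro k hk; ring

theorem pyGetD_cons_succ {α : Type} (x : α) (xs : List α) (j : Int) (d : α) (h : 0 ≤ j) :
    PySem.List.pyGetD (x::xs) (j+1) d = PySem.List.pyGetD xs j d := by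
  obtain ⟨k, rfl⟩ : ∃ k : Nat, j = (k : Int) := ⟨j.toNat, by omega⟩
  have h1 : ((k:Int)+1) = ((k+1:Nat):Int) := by push_cast; ring
  rw [h1, PySem.List.pyGetD_natCast, PySem.List.pyGetD_natCast]
  rfl

theorem pyGetD_neg_rev {α : Type} (xs : List α) (k : Nat) (d : α) (h : k < xs.length) :
    PySem.List.pyGetD xs (-((k:Int)+1)) d = PySem.List.pyGetD xs.reverse (k:Int) d := by
  unfold PySem.List.pyGetD PySem.List.pyGet? PySem.List.pyIdx?
  have h1 : ¬ (0 ≤ -((k:Int)+1)) := by omega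
  have h2 : -(xs.length:Int) ≤ -((k:Int)+1) := by omega
  have h3 : (0:Int) ≤ (k:Int) := by omega
  have h4 : (k:Int) < (xs.reverse.length:Int) := by simp; omega
  simp only [h1, h2, h3, h4, if_false, if_pos, Option.bind]
  have h5 : xs.length - (-(-((k:Int)+1))).toNat = xs.length - (k+1) := by omega
  have h6 : ((k:Int)).toNat = k := by omega
  rw [h5, h6]
  congr 1
  rw [List.getElem?_reverse h]
  congr 1
  omega

theorem popStep_zero (x : List String) (l : List (List String)) : popStep (x::l) 0 = l := by
  simp [popStep, PySem.List.pop?, PySem.List.pyIdx?]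

theorem popStep_nat (l : List (List String)) (k : Nat) :
    popStep l (k : Int) = if h : k < l.length then l.eraseIdx k else l := by
  split_ifs with h
  · rw [popStep, PySem.List.pop?_natCast l k h]; rfl
  · have : PySem.List.pop? l (k:Int) = none := by
      simp [PySem.List.pop?, PySem.List.pyIdx?]; omega
    simp [popStep, this]

theorem erasePops_shift (dl : List Int) (h : ∀ i ∈ dl, 0 ≤ i) (x : List String)
    (l : List (List String)) :
    erasePops (dl.map (·+1)) (x::l) = x :: erasePops dl l := by
  induction dl with
  | nil => rfl
  | cons i rest ih =>
    have hi : 0 ≤ i := h i (by simp)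
    have hrest : ∀ j ∈ rest, 0 ≤ j := fun j hj => h j (by simp [hj])
    show popStep (erasePops (rest.map (·+1)) (x::l)) (i+1) = x :: popStep (erasePops rest l) i
    rw [ih hrest]
    set r := erasePops rest l with hr
    obtain ⟨k, rfl⟩ : ∃ k : Nat, i = (k : Int) := ⟨i.toNat, by omega⟩
    have h1 : ((k:Int)+1) = ((k+1:Nat):Int) := by push_cast; ring
    rw [h1, popStep_nat, popStep_nat]
    by_cases hk : k < r.length
    · simp only [List.length_cons]
      rw [dif_pos (by omega), dif_pos hk]
      rfl
    · simp only [List.length_cons]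
      rw [dif_neg (by omega), dif_neg hk]

theorem adel_nonneg (l : List (List String)) : ∀ i ∈ adel l, 0 ≤ i := by
  intro i hi
  unfold adel at hi
  have := List.mem_filter.mp hi
  exact (PySem.List.mem_pyRange_one.mp this.1).1

theorem adel_nil : adel [] = [] := by
  unfold adel
  have : PySem.List.pyRange 0 (PySem.List.len ([] : List (List String)) - 1) 1 = [] := by
    apply PySem.List.pyRange_one_eq_nil; simp [PySem.List.len]
  rw [this]; rfl

theorem apred_cons_succ (x : List String) (xs : List (List String)) (i : Int) (h : 0 ≤ i) :
    apred (x::xs) (i+1) = apred xs i := by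
  unfold apred
  have hlen : PySem.List.len (x::xs) = PySem.List.len xs + 1 := by
    simp [PySem.List.len]
  rw [hlen]
  have hrange : PySem.List.pyRange (i+1+1) (PySem.List.len xs + 1) 1
      = (PySem.List.pyRange (i+1) (PySem.List.len xs) 1).map (·+1) := by
    rw [pyRange_map_succ]
  rw [hrange, List.any_map]
  have hhead : PySem.List.pyGetD (x::xs) (i+1) [] = PySem.List.pyGetD xs i [] :=
    pyGetD_cons_succ x xs i [] h
  apply PySem.List.any_congr_mem
  intro j hj
  have hj' := PySem.List.mem_pyRange_one.mp hj
  simp only [Function.comp]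
  rw [hhead, pyGetD_cons_succ x xs j [] (by omega)]

theorem apred_cons_zero (x : List String) (xs : List (List String)) :
    apred (x::xs) 0 = xs.any (fun y => akey x == akey y) := by
  unfold apred
  have hlen : PySem.List.len (x::xs) = PySem.List.len xs + 1 := by simp [PySem.List.len]
  rw [hlen]
  have hrange : PySem.List.pyRange (0+1) (PySem.List.len xs + 1) 1
      = (PySem.List.pyRange 0 (PySem.List.len xs) 1).map (·+1) := by
    rw [pyRange_map_succ]
  rw [hrange, List.any_map]
  have hhead : PySem.List.pyGetD (x::xs) 0 [] = x := by
    simp [PySem.List.pyGetD, PySem.List.pyGet?, PySem.List.pyIdx?]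
  have step1 : ((PySem.List.pyRange 0 (PySem.List.len xs) 1).any
      (fun j => PySem.List.pyGetD (PySem.List.pyGetD (x::xs) 0 []) 0 "" ==
                PySem.List.pyGetD (PySem.List.pyGetD (x::xs) (j+1) []) 0 ""))
      = ((PySem.List.pyRange 0 (PySem.List.len xs) 1).any
      (fun j => akey x == akey (PySem.List.pyGetD xs j []))) := by
    apply PySem.List.any_congr_mem
    intro j hj
    have hj' := PySem.List.mem_pyRange_one.mp hj
    rw [hhead, pyGetD_cons_succ x xs j [] (by omega)]
    rfl
  have step2 : ((PySem.List.pyRange 0 (PySem.List.len xs) 1).any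
      (fun j => akey x == akey (PySem.List.pyGetD xs j [])))
      = xs.any (fun y => akey x == akey y) := by
    conv_rhs => rw [← PySem.List.map_pyGetD_pyRange_zero (xs := xs) (d := [])]
    rw [List.any_map]
    rfl
  rw [← step2, ← step1]
  rfl

theorem adel_cons (x : List String) (xs : List (List String)) :
    adel (x::xs) = (if xs.any (fun y => akey x == akey y) then [0] else [])
      ++ (adel xs).map (·+1) := by
  unfold adel
  have hlen : PySem.List.len (x::xs) - 1 = PySem.List.len xs := by simp [PySem.List.len]
  rw [hlen]
  rcases Nat.eq_zero_or_pos xs.length with hn | hn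
  · have hxs : xs = [] := List.length_eq_zero_iff.mp hn
    subst hxs
    have h0 : PySem.List.pyRange 0 (PySem.List.len ([] : List (List String))) 1 = [] := by
      apply PySem.List.pyRange_one_eq_nil; simp [PySem.List.len]
    have h1 : PySem.List.pyRange 0 (PySem.List.len ([] : List (List String)) - 1) 1 = [] := by
      apply PySem.List.pyRange_one_eq_nil; simp [PySem.List.len]
    rw [h0, h1]
    simp
  · have hpos : (0:Int) < PySem.List.len xs := by simp [PySem.List.len]; omega
    rw [PySem.List.pyRange_one_cons hpos]
    have hrange : PySem.List.pyRange (0+1) (PySem.List.len xs) 1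
        = (PySem.List.pyRange 0 (PySem.List.len xs - 1) 1).map (·+1) := by
      rw [pyRange_map_succ]
      congr 1
      ring
    rw [hrange]
    rw [List.filter_cons]
    rw [apred_cons_zero]
    rw [List.filter_map]
    have hcong : List.filter (apred (x::xs) ∘ (·+1)) (PySem.List.pyRange 0 (PySem.List.len xs - 1) 1)
        = List.filter (apred xs) (PySem.List.pyRange 0 (PySem.List.len xs - 1) 1) := by
      apply List.filter_congr
      intro i hi
      have hi' := PySem.List.mem_pyRange_one.mp hi
      simp only [Function.comp]
      rw [apred_cons_succ x xs i (by omega)]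
    rw [hcong]
    split_ifs <;> rfl

theorem erasePops_adel (l : List (List String)) : erasePops (adel l) l = keepLast l := by
  induction l with
  | nil => rw [adel_nil]; rfl
  | cons x xs ih =>
    rw [adel_cons, keepLast]
    by_cases hg : xs.any (fun y => akey x == akey y)
    · rw [if_pos hg, if_pos hg]
      show popStep (erasePops ((adel xs).map (·+1)) (x::xs)) 0 = keepLast xs
      rw [erasePops_shift (adel xs) (adel_nonneg xs) x xs, popStep_zero, ih]
    · rw [if_neg hg, if_neg hg]
      show erasePops ((adel xs).map (·+1)) (x::xs) = x :: keepLast xs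
      rw [erasePops_shift (adel xs) (adel_nonneg xs) x xs, ih]

-- ---- B-side abstractions ----
def bstep (p : PySem.Set String × List (List String)) (atom : List String) :
    PySem.Set String × List (List String) :=
  if !(PySem.Set.contains p.1 (PySem.List.pyGetD atom 0 ""))
  then (PySem.Set.add p.1 (PySem.List.pyGetD atom 0 ""), p.2 ++ [atom])
  else p

-- keep-first dedup with a running seen set
def kfa : List (List String) → PySem.Set String → List (List String)
  | [], _ => []
  | x :: xs, s =>
    if PySem.Set.contains s (akey x) then kfa xs s else x :: kfa xs (PySem.Set.add s (akey x))

theorem contains_eq_mem (s : PySem.Set String) (x : String) :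
    PySem.Set.contains s x = decide (x ∈ s) := by
  simp [PySem.Set.contains]

theorem mem_of_contains (s : PySem.Set String) (x : String) (h : PySem.Set.contains s x = true) : x ∈ s := by
  rw [contains_eq_mem] at h
  exact of_decide_eq_true h

theorem foldl_bstep (m : List (List String)) :
    ∀ (s : PySem.Set String) (out : List (List String)),
    m.foldl bstep (s, out)
      = (m.foldl (fun s y => PySem.Set.add s (akey y)) s, out ++ kfa m s) := by
  induction m with
  | nil => intro s out; simp [kfa]
  | cons x xs ih =>
    intro s out
    show List.foldl bstep (bstep (s, out) x) xs = _
    by_cases hc : PySem.Set.contains s (akey x) = true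
    · have hb : bstep (s, out) x = (s, out) := by
        unfold bstep
        rw [show PySem.List.pyGetD x 0 "" = akey x from rfl, hc]
        rfl
      rw [hb, ih s out]
      have hs : PySem.Set.add s (akey x) = s := PySem.Set.add_of_mem (mem_of_contains s _ hc)
      have hk : kfa (x::xs) s = kfa xs s := by rw [kfa, if_pos hc]
      rw [hk, List.foldl_cons, hs]
    · have hcf : PySem.Set.contains s (akey x) = false := Bool.eq_false_iff.mpr hc
      have hb : bstep (s, out) x = (PySem.Set.add s (akey x), out ++ [x]) := by
        show (if (!(PySem.Set.contains s (akey x))) = true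
              then (PySem.Set.add s (akey x), out ++ [x]) else (s, out)) = _
        rw [hcf]
        rfl
      rw [hb, ih (PySem.Set.add s (akey x)) (out ++ [x])]
      have hk : kfa (x::xs) s = x :: kfa xs (PySem.Set.add s (akey x)) := by rw [kfa, if_neg hc]
      rw [List.foldl_cons, hk]
      simp

theorem mem_foldl_add_akey (a : List (List String)) (s : PySem.Set String) (v : String) :
    v ∈ a.foldl (fun s y => PySem.Set.add s (akey y)) s ↔ v ∈ s ∨ ∃ b ∈ a, v = akey b :=
  PySem.Set.mem_foldl_add a akey s v

theorem kfa_append (a b : List (List String)) :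
    ∀ s, kfa (a ++ b) s = kfa a s ++ kfa b (a.foldl (fun s y => PySem.Set.add s (akey y)) s) := by
  induction a with
  | nil => intro s; simp [kfa]
  | cons x xs ih =>
    intro s
    show kfa (x :: (xs ++ b)) s = _
    rw [kfa, kfa]
    by_cases hc : PySem.Set.contains s (akey x)
    · rw [if_pos hc, if_pos hc, ih s]
      have hs : PySem.Set.add s (akey x) = s := PySem.Set.add_of_mem (mem_of_contains s _ hc)
      simp [hs]
    · rw [if_neg hc, if_neg hc, ih (PySem.Set.add s (akey x))]
      simp

theorem kfa_rev (m : List (List String)) : kfa m.reverse PySem.Set.empty = (keepLast m).reverse := by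
  induction m with
  | nil => rfl
  | cons x xs ih =>
    rw [List.reverse_cons, kfa_append, ih]
    have hset : PySem.Set.contains
        (xs.reverse.foldl (fun s y => PySem.Set.add s (akey y)) PySem.Set.empty) (akey x)
        = xs.any (fun y => akey x == akey y) := by
      rw [contains_eq_mem]
      rcases h : xs.any (fun y => akey x == akey y) with _ | _
      · apply decide_eq_false
        rw [mem_foldl_add_akey]
        rintro (hmem | ⟨b, hb, hv⟩)
        · exact (List.not_mem_nil) hmem
        · rw [List.any_eq_false] at h
          have hx := h b (List.mem_reverse.mp hb)
          rw [hv] at hx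
          simp at hx
      · apply decide_eq_true
        rw [mem_foldl_add_akey]
        rw [List.any_eq_true] at h
        obtain ⟨b, hb, hbe⟩ := h
        exact Or.inr ⟨b, List.mem_reverse.mpr hb, eq_of_beq hbe⟩
    rw [keepLast]
    by_cases hg : xs.any (fun y => akey x == akey y)
    · rw [if_pos hg]
      rw [kfa]
      rw [hset, if_pos hg]
      simp [kfa]
    · rw [if_neg hg]
      rw [kfa]
      rw [hset, if_neg (by simp [hg])]
      simp [kfa]

-- ---- data phase: A's triple index loop builds matchedOf ----
theorem dataA_eq_matched (ffname : List (List (List String))) (atom_list : List (List String)) :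
    pyDataA ffname atom_list = matchedOf ffname atom_list := by
  unfold pyDataA
  have hentry : ∀ (acc : List (List String)) (entry : List String),
      (PySem.List.pyRange 0 (PySem.List.len atom_list) 1).foldl (fun data k =>
        if PySem.List.pyGetD entry 1 "" == PySem.List.pyGetD (PySem.List.pyGetD atom_list k []) 0 ""
        then data ++ [PySem.List.pyGetD atom_list k []] else data) acc
      = acc ++ atom_list.filter (fun atom =>
          PySem.List.pyGetD entry 1 "" == PySem.List.pyGetD atom 0 "") := by
    intro acc entry
    rw [PySem.List.foldl_pyRange_zero_pyGetD (xs := atom_list) (d := ([] : List String))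
        (f := fun data atom =>
          if PySem.List.pyGetD entry 1 "" == PySem.List.pyGetD atom 0 ""
          then data ++ [atom] else data) (init := acc)]
    exact PySem.List.foldl_append_if_eq_filter _ _ _
  have hrow : ∀ (acc : List (List String)) (row : List (List String)),
      (PySem.List.pyRange 0 (PySem.List.len row) 1).foldl (fun data j =>
        (PySem.List.pyRange 0 (PySem.List.len atom_list) 1).foldl (fun data k =>
          if PySem.List.pyGetD (PySem.List.pyGetD row j []) 1 "" ==
             PySem.List.pyGetD (PySem.List.pyGetD atom_list k []) 0 ""
          then data ++ [PySem.List.pyGetD atom_list k []] else data) data) acc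
      = acc ++ row.flatMap (fun entry => atom_list.filter (fun atom =>
          PySem.List.pyGetD entry 1 "" == PySem.List.pyGetD atom 0 "")) := by
    intro acc row
    rw [PySem.List.foldl_pyRange_zero_pyGetD (xs := row) (d := ([] : List String))
        (f := fun data entry =>
          (PySem.List.pyRange 0 (PySem.List.len atom_list) 1).foldl (fun data k =>
            if PySem.List.pyGetD entry 1 "" ==
               PySem.List.pyGetD (PySem.List.pyGetD atom_list k []) 0 ""
            then data ++ [PySem.List.pyGetD atom_list k []] else data) data) (init := acc)]
    calc row.foldl (fun data entry =>
          (PySem.List.pyRange 0 (PySem.List.len atom_list) 1).foldl (fun data k =>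
            if PySem.List.pyGetD entry 1 "" ==
               PySem.List.pyGetD (PySem.List.pyGetD atom_list k []) 0 ""
            then data ++ [PySem.List.pyGetD atom_list k []] else data) data) acc
        = row.foldl (fun data entry => data ++ atom_list.filter (fun atom =>
            PySem.List.pyGetD entry 1 "" == PySem.List.pyGetD atom 0 "")) acc :=
          PySem.List.foldl_congr_mem _ _ _ _ (fun acc2 entry _ => hentry acc2 entry)
      _ = acc ++ row.flatMap (fun entry => atom_list.filter (fun atom =>
            PySem.List.pyGetD entry 1 "" == PySem.List.pyGetD atom 0 "")) :=
          PySem.List.foldl_append_eq_flatMap _ _ _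
  rw [PySem.List.foldl_pyRange_zero_pyGetD (xs := ffname) (d := ([] : List (List String)))
      (f := fun data row =>
        (PySem.List.pyRange 0 (PySem.List.len row) 1).foldl (fun data j =>
          (PySem.List.pyRange 0 (PySem.List.len atom_list) 1).foldl (fun data k =>
            if PySem.List.pyGetD (PySem.List.pyGetD row j []) 1 "" ==
               PySem.List.pyGetD (PySem.List.pyGetD atom_list k []) 0 ""
            then data ++ [PySem.List.pyGetD atom_list k []] else data) data) data)
      (init := ([] : List (List String)))]
  calc ffname.foldl (fun data row =>
        (PySem.List.pyRange 0 (PySem.List.len row) 1).foldl (fun data j =>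
          (PySem.List.pyRange 0 (PySem.List.len atom_list) 1).foldl (fun data k =>
            if PySem.List.pyGetD (PySem.List.pyGetD row j []) 1 "" ==
               PySem.List.pyGetD (PySem.List.pyGetD atom_list k []) 0 ""
            then data ++ [PySem.List.pyGetD atom_list k []] else data) data) data) []
      = ffname.foldl (fun data row => data ++ row.flatMap (fun entry =>
          atom_list.filter (fun atom =>
            PySem.List.pyGetD entry 1 "" == PySem.List.pyGetD atom 0 ""))) [] :=
        PySem.List.foldl_congr_mem _ _ _ _ (fun acc row _ => hrow acc row)
    _ = matchedOf ffname atom_list := by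
        rw [PySem.List.foldl_append_eq_flatMap]
        rfl

-- ---- dellist phase is adel ----
theorem dellistA_eq_adel (data : List (List String)) : pyDellistA data = adel data := by
  unfold pyDellistA adel apred
  exact PySem.List.foldl_append_if_eq_filter _ _ _

-- ---- pops phase is erasePops ----
theorem popsA_eq_erasePops (dl : List Int) (data : List (List String)) :
    (PySem.List.pyRange 0 (PySem.List.len dl) 1).foldl (fun d i =>
      ((PySem.List.pop? d (PySem.List.pyGetD dl (-(i+1)) 0)).map Prod.snd).getD d) data
    = erasePops dl data := by
  have hcong : (PySem.List.pyRange 0 (PySem.List.len dl) 1).foldl (fun d i =>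
      ((PySem.List.pop? d (PySem.List.pyGetD dl (-(i+1)) 0)).map Prod.snd).getD d) data
      = (PySem.List.pyRange 0 (PySem.List.len dl.reverse) 1).foldl (fun d i =>
      popStep d (PySem.List.pyGetD dl.reverse i 0)) data := by
    have hlen : PySem.List.len dl = PySem.List.len dl.reverse := by simp [PySem.List.len]
    rw [← hlen]
    apply PySem.List.foldl_congr_mem
    intro d i hi
    have hi' := PySem.List.mem_pyRange_one.mp hi
    obtain ⟨k, rfl⟩ : ∃ k : Nat, i = (k : Int) := ⟨i.toNat, by omega⟩
    have hk : k < dl.length := by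
      have := hi'.2
      simp [PySem.List.len] at this
      omega
    rw [← pyGetD_neg_rev dl k 0 hk]
    rfl
  rw [hcong]
  rw [PySem.List.foldl_pyRange_zero_pyGetD (xs := dl.reverse) (d := (0 : Int))
      (f := popStep) (init := data)]
  rw [List.foldl_reverse]
  rfl

-- ---- assembly ----
theorem portA_eq (ffname : List (List (List String))) (atom_list : List (List String)) :
    getljparam ffname atom_list = keepLast (matchedOf ffname atom_list) := by
  show (PySem.List.pyRange 0 (PySem.List.len (pyDellistA (pyDataA ffname atom_list))) 1).foldl
      (fun d i => ((PySem.List.pop? d (PySem.List.pyGetD (pyDellistA (pyDataA ffname atom_list))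
        (-(i+1)) 0)).map Prod.snd).getD d) (pyDataA ffname atom_list)
    = keepLast (matchedOf ffname atom_list)
  rw [popsA_eq_erasePops, dellistA_eq_adel, dataA_eq_matched, erasePops_adel]

theorem portB_eq (ffname : List (List (List String))) (atom_list : List (List String)) :
    getljparam_alt ffname atom_list = keepLast (matchedOf ffname atom_list) := by
  show ((matchedOf ffname atom_list).reverse.foldl bstep (PySem.Set.empty, [])).2.reverse
    = keepLast (matchedOf ffname atom_list)
  rw [foldl_bstep]
  show (([] : List (List String)) ++ kfa (matchedOf ffname atom_list).reverse PySem.Set.empty).reverse = _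
  rw [List.nil_append, kfa_rev, List.reverse_reverse]

-- ===== VERDICT (by name: the statement is the Claim_ definition above) =====
theorem getljparam_spec : Claim_equal_getljparam := by
  intro ffname atom_list _ _
  unfold Spec_getljparam
  rw [portA_eq, portB_eq]
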